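-- pv_equiv track=rewrite | github.com/olistrut/AOC2023 | Day21.py | part2
-- ===== SOURCE A (Python) =====
-- from collections import defaultdict
--
-- directions = [(1, 0), (0, 1), (-1, 0), (0, -1)]
--
-- def def_value():
--     return "."
--
-- def runStepsPart2(listgrid, width, height, start, steps):
--     grid = defaultdict(def_value)
--
--     for x in range(width):
--         for y in range(height):
--             if listgrid[x][y] == '#':
--                 grid[(x, y)] = listgrid[x][y]
--
--     queue = []
--     queue.append((start, 0))
--     visited = {}
--
--     while queue:
--         (x, y), step = queue.pop(0)
--         if (x, y) in visited:
--             continue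
--
--         visited[(x, y)] = step
--
--         for dx, dy in directions:
--             newX = x + dx
--             newY = y + dy
--             if step < steps and grid[(newX % width, newY % height)] != '#':
--                 queue.append(((newX, newY), step + 1))
--
--     if steps % 2 == 0:
--         return sum([1 for pos, v in visited.items() if v % 2 == 0])
--     else:
--         return sum([1 for pos, v in visited.items() if v % 2 == 1])
--
-- def part2(listgrid, width, height, start, target):
--     base = target % width
--
--     results = []
--     diff = []
--     diffofdiff = []
--
--     for i, round in enumerate(range(base, base + 8 * width, width)):  # round should be 196 when we exit
--         results.append(runStepsPart2(listgrid, width, height, start, round))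
--         if len(results) >= 2:
--             diff.append(results[-1] - results[-2])
--         if len(diff) >= 2:
--             diffofdiff.append(diff[-1] - diff[-2])
--
--         if len(diffofdiff) >= 3:
--             if diffofdiff[-1] == diffofdiff[-2] == diffofdiff[-3]:
--                 break
--
--     result = results[-1]  # 34125
--     distance = diff[-1]  # 30290
--     diffofdiff = diffofdiff[-1]  # 30188
--
--     for i in range((target - round) // width):
--         distance += diffofdiff
--         result = result + distance
--         round += width
--
--     return result
-- ===== SOURCE B (Python) =====
-- directions = [(1, 0), (0, 1), (-1, 0), (0, -1)]
--
-- def part2(listgrid, width, height, start, target):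
--     # Level-by-level frontier BFS with even/odd counters instead of a FIFO queue
--     # with a step-labelled visited dict; the sampling loop keeps a sliding window
--     # of scalars instead of growing results/diff/diffofdiff lists; the
--     # extrapolation tail is a closed-form Gauss sum instead of a loop.
--     def iswall(x, y):
--         return listgrid[x % width][y % height] == '#'
--
--     def run(steps):
--         seen = {start}
--         frontier = [start]
--         counts = [1, 0]
--         level = 0
--         while frontier and level < steps:
--             newf = []
--             for x, y in frontier:
--                 for dx, dy in directions:
--                     n = (x + dx, y + dy)
--                     if not iswall(n[0], n[1]) and n not in seen:
--                         seen.add(n)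
--                         newf.append(n)
--             level += 1
--             counts[level % 2] += len(newf)
--             frontier = newf
--         return counts[steps % 2]
--
--     base = target % width
--     k = 0
--     prev = d = dd1 = dd2 = dd3 = 0
--     for round in range(base, base + 8 * width, width):
--         v = run(round)
--         if k >= 1:
--             nd = v - prev
--             if k >= 2:
--                 dd3, dd2, dd1 = dd2, dd1, nd - d
--             d = nd
--         prev = v
--         k += 1
--         if k >= 5 and dd1 == dd2 == dd3:
--             break
--
--     n = max(0, (target - round) // width)
--     return prev + n * d + dd1 * (n * (n + 1) // 2)
-- ===== Notes on version B (the rewrite author's own statement) =====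
-- stated objective: alternative
-- what changed: runStepsPart2's FIFO queue (repeated list.pop(0), duplicate queue entries, step-labelled visited dict) is replaced by a level-by-level frontier BFS over sets with even/odd counters; the driver's growing results/diff/diffofdiff lists with negative indexing are replaced by a sliding window of five scalars, and the iterative extrapolation tail by a closed-form Gauss sum.
-- outside the precondition, e.g. on part2(['#..', '...', '.#.', '..#.'], 1, -1, (1, -2), 17): A returns 324, B returns -120; on part2(['.#'], 3, -1, (-2, -1), -2): A returns 196, B raises IndexError
import Mathlib
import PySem

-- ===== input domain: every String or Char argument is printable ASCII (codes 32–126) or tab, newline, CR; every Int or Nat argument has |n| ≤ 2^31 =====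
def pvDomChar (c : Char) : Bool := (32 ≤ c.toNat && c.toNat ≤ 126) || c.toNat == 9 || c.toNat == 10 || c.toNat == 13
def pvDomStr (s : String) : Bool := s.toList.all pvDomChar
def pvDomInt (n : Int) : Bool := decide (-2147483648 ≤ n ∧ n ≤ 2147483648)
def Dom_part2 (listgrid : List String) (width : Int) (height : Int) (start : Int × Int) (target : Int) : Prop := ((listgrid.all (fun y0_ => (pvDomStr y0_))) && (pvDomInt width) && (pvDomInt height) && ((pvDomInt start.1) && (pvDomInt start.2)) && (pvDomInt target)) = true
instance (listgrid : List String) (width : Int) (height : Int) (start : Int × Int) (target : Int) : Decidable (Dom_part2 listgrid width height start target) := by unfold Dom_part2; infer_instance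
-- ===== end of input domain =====

-- B replaces A's FIFO-queue BFS (step-labelled visited dict) by a level-by-level
-- frontier BFS with even/odd counters, A's growing results/diff/diffofdiff lists by a
-- sliding window of scalars, and A's iterative extrapolation tail by a closed form.

-- ===== PORT A =====

def pvDirections : List (Int × Int) := [(1, 0), (0, 1), (-1, 0), (0, -1)]

-- listgrid[x][y] as an Option (none exactly where Python raises IndexError)
def pvCharAt (listgrid : List String) (x y : Int) : Option Char :=
  (PySem.List.pyGet? listgrid x).bind (fun row => PySem.Str.pyGet? row y)

-- grid = defaultdict('.'), then grid[(x,y)] = '#' for every wall cell of the base tile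
def pvGridA (listgrid : List String) (width height : Int) : PySem.Dict (Int × Int) String :=
  (PySem.List.pyRange 0 width 1).foldl (fun g x =>
    (PySem.List.pyRange 0 height 1).foldl (fun g y =>
      if pvCharAt listgrid x y = some '#' then g.insert (x, y) "#" else g) g)
    PySem.Dict.empty

-- fuel bound for the while loop: at most `m` pending entries at the current level
-- generate at most `4*m` at the next; sufficiency is proved below (pvNeed_mono / main lemma)
def pvNeed : Nat → Nat → Nat
  | 0, m => m
  | r + 1, m => m + pvNeed r (4 * m)

-- the `while queue:` loop, step for step (pop front; skip if visited; else insert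
-- with its step and append the four admissible neighbours)
def pvBfsA (grid : PySem.Dict (Int × Int) String) (width height steps : Int) :
    Nat → List ((Int × Int) × Int) → PySem.Dict (Int × Int) Int → PySem.Dict (Int × Int) Int
  | 0, _, visited => visited
  | _ + 1, [], visited => visited
  | fuel + 1, (p, step) :: queue, visited =>
    if PySem.Dict.contains visited p then
      pvBfsA grid width height steps fuel queue visited
    else
      pvBfsA grid width height steps fuel
        (pvDirections.foldl (fun q d =>
          if step < steps ∧ PySem.Dict.getD grid
              (PySem.Int.mod (p.1 + d.1) width, PySem.Int.mod (p.2 + d.2) height) "." ≠ "#"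
          then q ++ [((p.1 + d.1, p.2 + d.2), step + 1)] else q) queue)
        (visited.insert p step)

def pvRunStepsA (listgrid : List String) (width height : Int) (start : Int × Int) (steps : Int) : Int :=
  let grid := pvGridA listgrid width height
  let visited := pvBfsA grid width height steps (1 + pvNeed steps.toNat 4) [(start, 0)] PySem.Dict.empty
  if PySem.Int.mod steps 2 = 0 then
    ((visited.items.filter (fun kv => PySem.Int.mod kv.2 2 == 0)).map (fun _ => (1 : Int))).sum
  else
    ((visited.items.filter (fun kv => PySem.Int.mod kv.2 2 == 1)).map (fun _ => (1 : Int))).sum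

-- the sampling loop of part2 (pyGetD defaults below are guarded by the length checks and never fire)
def pvLoopA (listgrid : List String) (width height : Int) (start : Int × Int) :
    List Int → List Int → List Int → List Int → Int → (List Int × List Int × List Int × Int)
  | [], results, diff, dd, round => (results, diff, dd, round)
  | r :: rest, results, diff, dd, _ =>
    let results := results ++ [pvRunStepsA listgrid width height start r]
    let diff := if 2 ≤ results.length then
        diff ++ [PySem.List.pyGetD results (-1) 0 - PySem.List.pyGetD results (-2) 0] else diff
    let dd := if 2 ≤ diff.length then
        dd ++ [PySem.List.pyGetD diff (-1) 0 - PySem.List.pyGetD diff (-2) 0] else dd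
    if 3 ≤ dd.length ∧ PySem.List.pyGetD dd (-1) 0 = PySem.List.pyGetD dd (-2) 0
        ∧ PySem.List.pyGetD dd (-2) 0 = PySem.List.pyGetD dd (-3) 0 then
      (results, diff, dd, r)
    else pvLoopA listgrid width height start rest results diff dd r

def part2 (listgrid : List String) (width : Int) (height : Int) (start : Int × Int) (target : Int) : Int :=
  let base := PySem.Int.mod target width
  let s := pvLoopA listgrid width height start
      (PySem.List.pyRange base (base + 8 * width) width) [] [] [] base
  let result := PySem.List.pyGetD s.1 (-1) 0
  let distance := PySem.List.pyGetD s.2.1 (-1) 0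
  let ddl := PySem.List.pyGetD s.2.2.1 (-1) 0
  ((PySem.List.pyRange 0 (PySem.Int.floordiv (target - s.2.2.2) width) 1).foldl
    (fun rd _ => (rd.1 + rd.2 + ddl, rd.2 + ddl)) (result, distance)).1

-- ===== PORT B =====

def pvIsWallB (listgrid : List String) (width height x y : Int) : Bool :=
  pvCharAt listgrid (PySem.Int.mod x width) (PySem.Int.mod y height) == some '#'

-- one BFS level: expand every frontier cell, collecting unseen non-wall neighbours
def pvExpandB (listgrid : List String) (width height : Int)
    (frontier : List (Int × Int)) (seen : PySem.Set (Int × Int)) :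
    PySem.Set (Int × Int) × List (Int × Int) :=
  frontier.foldl (fun sn p =>
    pvDirections.foldl (fun sn d =>
      let n : Int × Int := (p.1 + d.1, p.2 + d.2)
      if !pvIsWallB listgrid width height n.1 n.2 && !(PySem.Set.contains sn.1 n) then
        (PySem.Set.add sn.1 n, sn.2 ++ [n])
      else sn) sn) (seen, [])

-- the `while frontier and level < steps:` loop; `remaining` counts the levels still
-- allowed (= steps - level, so it is 0 exactly when `level < steps` fails)
def pvLvlB (listgrid : List String) (width height : Int) :
    Nat → Int → List (Int × Int) → PySem.Set (Int × Int) → Int → Int → Int × Int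
  | 0, _, _, _, c0, c1 => (c0, c1)
  | _ + 1, _, [], _, c0, c1 => (c0, c1)
  | rem + 1, level, q :: frontier, seen, c0, c1 =>
    let sn := pvExpandB listgrid width height (q :: frontier) seen
    let level := level + 1
    if PySem.Int.mod level 2 = 0 then
      pvLvlB listgrid width height rem level sn.2 sn.1 (c0 + sn.2.length) c1
    else
      pvLvlB listgrid width height rem level sn.2 sn.1 c0 (c1 + sn.2.length)

def pvRunStepsB (listgrid : List String) (width height : Int) (start : Int × Int) (steps : Int) : Int :=
  let c := pvLvlB listgrid width height steps.toNat 0 [start] (PySem.Set.ofList [start]) 1 0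
  if PySem.Int.mod steps 2 = 0 then c.1 else c.2

-- the sliding-window update of one sampling round: from (k, prev, d, dd1, dd2, dd3)
-- and the fresh sample v, the new (d, dd1, dd2, dd3)
def pvStepB (k prev d dd1 dd2 dd3 v : Int) : Int × Int × Int × Int :=
  if 1 ≤ k then
    if 2 ≤ k then (v - prev, v - prev - d, dd1, dd2)
    else (v - prev, dd1, dd2, dd3)
  else (d, dd1, dd2, dd3)

-- the sampling loop over the rounds, carrying only the scalars the tail needs:
-- returns (last result, last diff, last second difference, last round)
def pvSampleB (listgrid : List String) (width height : Int) (start : Int × Int) :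
    List Int → Int → Int → Int → Int → Int → Int → Int → Int × Int × Int × Int
  | [], _, prev, d, dd1, _, _, round => (prev, d, dd1, round)
  | r :: rest, k, prev, d, dd1, dd2, dd3, _ =>
    let v := pvRunStepsB listgrid width height start r
    let u := pvStepB k prev d dd1 dd2 dd3 v
    if 5 ≤ k + 1 ∧ u.2.1 = u.2.2.1 ∧ u.2.2.1 = u.2.2.2 then (v, u.1, u.2.1, r)
    else pvSampleB listgrid width height start rest (k + 1) v u.1 u.2.1 u.2.2.1 u.2.2.2 r

def part2_alt (listgrid : List String) (width : Int) (height : Int) (start : Int × Int) (target : Int) : Int :=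
  let base := PySem.Int.mod target width
  let s := pvSampleB listgrid width height start
      (PySem.List.pyRange base (base + 8 * width) width) 0 0 0 0 0 0 base
  let n := max 0 (PySem.Int.floordiv (target - s.2.2.2) width)
  s.1 + n * s.2.1 + s.2.2.1 * PySem.Int.floordiv (n * (n + 1)) 2

-- ===== PRECONDITION & SPEC =====
-- Pre_ restricts to the natural domain of the grid walk: positive dimensions covered by
-- the grid (or negative width, where no BFS step is ever taken).  Outside it Python A
-- either raises (width = 0, height = 0, or a grid shorter than width/height) or, for
-- negative height with positive width, returns values produced by indexing an empty
-- wall dictionary, which B (reading the grid directly) does not reproduce.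
def Pre_part2 (listgrid : List String) (width : Int) (height : Int) (start : Int × Int) (target : Int) : Prop :=
  width < 0 ∨ (1 ≤ width ∧ 1 ≤ height ∧ width ≤ (listgrid.length : Int) ∧
    ∀ s ∈ listgrid.take width.toNat, height ≤ (s.toList.length : Int))
instance (listgrid : List String) (width : Int) (height : Int) (start : Int × Int) (target : Int) : Decidable (Pre_part2 listgrid width height start target) := by unfold Pre_part2; infer_instance

def pvWitness_part2 : List String × Int × Int × (Int × Int) × Int := (["..", ".#"], 2, 2, (0, 0), 7)

def Spec_part2 (listgrid : List String) (width : Int) (height : Int) (start : Int × Int) (target : Int) (out : Int) : Prop := out = part2_alt listgrid width height start target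
instance (listgrid : List String) (width : Int) (height : Int) (start : Int × Int) (target : Int) (out : Int) : Decidable (Spec_part2 listgrid width height start target out) := by unfold Spec_part2; infer_instance

-- ===== CLAIM (what is proved, stated in full; the proofs are below) =====
def Claim_equal_part2 : Prop := ∀ (listgrid : List String) (width : Int) (height : Int) (start : Int × Int) (target : Int), Dom_part2 listgrid width height start target → Pre_part2 listgrid width height start target → Spec_part2 listgrid width height start target (part2 listgrid width height start target)

-- ===== LEMMAS AND PROOFS =====

-- `new` elements of a candidate stream: first occurrences not yet in S (dedup against S)
def pvFresh : List (Int × Int) → List (Int × Int) → List (Int × Int)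
  | _, [] => []
  | S, n :: t => if n ∈ S then pvFresh S t else n :: pvFresh (S ++ [n]) t

-- the admissible (non-wall) neighbours of a cell
def pvNb (listgrid : List String) (width height : Int) (p : Int × Int) : List (Int × Int) :=
  (pvDirections.map (fun d => (p.1 + d.1, p.2 + d.2))).filter
    (fun n => !pvIsWallB listgrid width height n.1 n.2)

-- parity count over the visited dict (definitionally the counting in pvRunStepsA)
def pvCountPar (v : PySem.Dict (Int × Int) Int) (b : Int) : Int :=
  ((v.items.filter (fun kv => PySem.Int.mod kv.2 2 == b)).map (fun _ => (1 : Int))).sum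

theorem pvNeed_mono : ∀ r {m m' : Nat}, m ≤ m' → pvNeed r m ≤ pvNeed r m' := by
  intro r
  induction r with
  | zero => intro m m' h; simpa [pvNeed] using h
  | succ r ih =>
    intro m m' h
    simp only [pvNeed]
    exact Nat.add_le_add h (ih (by omega))

theorem pvFresh_length_le : ∀ S cs, (pvFresh S cs).length ≤ cs.length := by
  intro S cs
  induction cs generalizing S with
  | nil => simp [pvFresh]
  | cons n t ih =>
    by_cases hn : n ∈ S <;> simp [pvFresh, hn]
    · exact (ih S).trans (by omega)
    · exact ih _

theorem pvFresh_nodup_append : ∀ cs S, S.Nodup → (S ++ pvFresh S cs).Nodup := by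
  intro cs
  induction cs with
  | nil => intro S h; simpa [pvFresh]
  | cons n t ih =>
    intro S h
    by_cases hn : n ∈ S
    · simpa [pvFresh, hn] using ih S h
    · have hsn : (S ++ [n]).Nodup :=
        h.append (List.nodup_singleton n) (List.disjoint_singleton.mpr hn)
      have := ih (S ++ [n]) hsn
      rw [pvFresh, if_neg hn, List.append_cons]
      exact this

-- grid lookup characterization
theorem pvRowGet (listgrid : List String) (x : Int) :
    ∀ (L : List Int) (g : PySem.Dict (Int × Int) String) (q : Int × Int),
      (L.foldl (fun g y => if pvCharAt listgrid x y = some '#' then g.insert (x, y) "#" else g) g).get? q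
      = if q.1 = x ∧ q.2 ∈ L ∧ pvCharAt listgrid x q.2 = some '#' then some "#" else g.get? q := by
  intro L
  induction L with
  | nil => intro g q; simp
  | cons y t ih =>
    intro g q
    rw [List.foldl_cons, ih]
    by_cases hc : pvCharAt listgrid x y = some '#'
    · rw [if_pos hc, PySem.Dict.get?_insert]
      by_cases h1 : q.1 = x <;> by_cases h2 : q.2 = y <;>
        simp_all [Prod.ext_iff] <;> tauto
    · rw [if_neg hc]
      by_cases h1 : q.1 = x <;> by_cases h2 : q.2 = y <;>
        simp_all [Prod.ext_iff] <;> tauto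

theorem pvColGet (listgrid : List String) (h : Int) :
    ∀ (L : List Int) (g : PySem.Dict (Int × Int) String) (q : Int × Int),
      (L.foldl (fun g x =>
        (PySem.List.pyRange 0 h 1).foldl (fun g y =>
          if pvCharAt listgrid x y = some '#' then g.insert (x, y) "#" else g) g) g).get? q
      = if q.1 ∈ L ∧ 0 ≤ q.2 ∧ q.2 < h ∧ pvCharAt listgrid q.1 q.2 = some '#' then some "#" else g.get? q := by
  intro L
  induction L with
  | nil => intro g q; simp
  | cons x t ih =>
    intro g q
    rw [List.foldl_cons, ih, pvRowGet]
    by_cases h1 : q.1 = x <;>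
      simp_all [PySem.List.mem_pyRange_one] <;> split_ifs <;> tauto

theorem pvGridA_get? (listgrid : List String) (w h : Int) (q : Int × Int) :
    (pvGridA listgrid w h).get? q =
      if 0 ≤ q.1 ∧ q.1 < w ∧ 0 ≤ q.2 ∧ q.2 < h ∧ pvCharAt listgrid q.1 q.2 = some '#'
      then some "#" else none := by
  rw [pvGridA, pvColGet]
  simp [PySem.List.mem_pyRange_one, and_assoc]

theorem pvWall_iff' (listgrid : List String) {w h : Int} (hw : 1 ≤ w) (hh : 1 ≤ h) (x y : Int) :
    (PySem.Dict.getD (pvGridA listgrid w h) (PySem.Int.mod x w, PySem.Int.mod y h) "." = "#")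
      ↔ pvIsWallB listgrid w h x y = true := by
  rw [PySem.Dict.getD_eq_get?_getD, pvGridA_get?]
  have h1 := PySem.Int.mod_nonneg x (by omega : (0:Int) < w)
  have h2 := PySem.Int.mod_lt x (by omega : (0:Int) < w)
  have h3 := PySem.Int.mod_nonneg y (by omega : (0:Int) < h)
  have h4 := PySem.Int.mod_lt y (by omega : (0:Int) < h)
  rw [pvIsWallB]
  by_cases hc : pvCharAt listgrid (PySem.Int.mod x w) (PySem.Int.mod y h) = some '#' <;>
    simp [hc, h1, h2, h3, h4]

theorem pvWall_iff (listgrid : List String) {w h : Int} (hw : 1 ≤ w) (hh : 1 ≤ h) (x y : Int) :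
    (PySem.Dict.getD (pvGridA listgrid w h) (PySem.Int.mod x w, PySem.Int.mod y h) "." ≠ "#")
      ↔ pvIsWallB listgrid w h x y = false := by
  rw [← Bool.not_eq_true]
  exact not_congr (pvWall_iff' listgrid hw hh x y)

-- the inner `for dx, dy in directions` loop of A, as one append
theorem pvDirFold (listgrid : List String) {w h : Int} (hw : 1 ≤ w) (hh : 1 ≤ h)
    (steps s : Int) (q : Int × Int) (queue : List ((Int × Int) × Int)) :
    pvDirections.foldl (fun qu d =>
        if s < steps ∧ PySem.Dict.getD (pvGridA listgrid w h)
            (PySem.Int.mod (q.1 + d.1) w, PySem.Int.mod (q.2 + d.2) h) "." ≠ "#"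
        then qu ++ [((q.1 + d.1, q.2 + d.2), s + 1)] else qu) queue
    = queue ++ (if s < steps then (pvNb listgrid w h q).map (fun p => (p, s + 1)) else []) := by
  by_cases hlt : s < steps
  · rw [PySem.List.foldl_append_ite
      (p := fun d : Int × Int => s < steps ∧ PySem.Dict.getD (pvGridA listgrid w h)
            (PySem.Int.mod (q.1 + d.1) w, PySem.Int.mod (q.2 + d.2) h) "." ≠ "#")
      (f := fun d : Int × Int => (((q.1 + d.1 : Int), (q.2 + d.2 : Int)), s + 1)), if_pos hlt]
    congr 1
    have hpt : ∀ d : Int × Int,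
        (decide (s < steps ∧ PySem.Dict.getD (pvGridA listgrid w h)
            (PySem.Int.mod (q.1 + d.1) w, PySem.Int.mod (q.2 + d.2) h) "." ≠ "#"))
        = !pvIsWallB listgrid w h (q.1 + d.1) (q.2 + d.2) := by
      intro d
      by_cases hb : pvIsWallB listgrid w h (q.1 + d.1) (q.2 + d.2) = true
      · have hg := (pvWall_iff' listgrid hw hh (q.1 + d.1) (q.2 + d.2)).mpr hb
        simp [hlt, hb, hg]
      · have hb' : pvIsWallB listgrid w h (q.1 + d.1) (q.2 + d.2) = false := by simpa using hb
        have hg := (pvWall_iff listgrid hw hh (q.1 + d.1) (q.2 + d.2)).mpr hb'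
        simp [hlt, hb', hg]
    rw [List.filter_congr (fun d _ => hpt d), pvNb, List.filter_map, List.map_map]
    rfl
  · have : ∀ d : Int × Int, ¬ (s < steps ∧ PySem.Dict.getD (pvGridA listgrid w h)
        (PySem.Int.mod (q.1 + d.1) w, PySem.Int.mod (q.2 + d.2) h) "." ≠ "#") := by
      intro d hc; exact hlt hc.1
    rw [show (fun (qu : List ((Int × Int) × Int)) (d : Int × Int) =>
        if s < steps ∧ PySem.Dict.getD (pvGridA listgrid w h)
            (PySem.Int.mod (q.1 + d.1) w, PySem.Int.mod (q.2 + d.2) h) "." ≠ "#"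
        then qu ++ [((q.1 + d.1, q.2 + d.2), s + 1)] else qu)
        = fun qu _ => qu from funext fun qu => funext fun d => if_neg (this d),
      PySem.List.foldl_ignore, if_neg hlt, List.append_nil]

-- one level of A's queue loop, reorganized
theorem pvBfsA_level (listgrid : List String) {w h : Int} (steps : Int)
    (hw : 1 ≤ w) (hh : 1 ≤ h) (s : Int) :
    ∀ (cur nxt : List (Int × Int)) (v : PySem.Dict (Int × Int) Int) (f : Nat),
      cur.length ≤ f →
      pvBfsA (pvGridA listgrid w h) w h steps f
        (cur.map (fun p => (p, s)) ++ nxt.map (fun p => (p, s + 1))) v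
      = pvBfsA (pvGridA listgrid w h) w h steps (f - cur.length)
          ((nxt ++ if s < steps then (pvFresh v.keys cur).flatMap (pvNb listgrid w h) else []).map
            (fun p => (p, s + 1)))
          ((pvFresh v.keys cur).foldl (fun v p => v.insert p s) v) := by
  intro cur
  induction cur with
  | nil =>
    intro nxt v f _
    simp [pvFresh]
  | cons q t ih =>
    intro nxt v f hf
    simp only [List.length_cons] at hf
    obtain ⟨f', rfl⟩ : ∃ f', f = f' + 1 := ⟨f - 1, by omega⟩
    simp only [List.map_cons, List.cons_append, pvBfsA]
    by_cases hq : PySem.Dict.contains v q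
    · rw [if_pos hq]
      have hmem : q ∈ v.keys := (PySem.Dict.contains_iff_mem_keys v q).mp hq
      rw [show pvFresh v.keys (q :: t) = pvFresh v.keys t by rw [pvFresh, if_pos hmem]]
      have := ih nxt v f' (by omega)
      rw [show f' + 1 - (q :: t).length = f' - t.length by simp]
      exact this
    · rw [if_neg hq]
      have hmem : q ∉ v.keys := fun hc => hq ((PySem.Dict.contains_iff_mem_keys v q).mpr hc)
      have hcon : v.contains q = false := by rw [← Bool.not_eq_true]; exact hq
      rw [pvDirFold listgrid hw hh steps s q]
      have hkeys : (v.insert q s).keys = v.keys ++ [q] :=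
        PySem.Dict.keys_insert_of_not_contains v s hcon
      have hfr : pvFresh v.keys (q :: t) = q :: pvFresh (v.keys ++ [q]) t := by
        rw [pvFresh, if_neg hmem]
      rw [hfr, List.foldl_cons, List.flatMap_cons]
      have hqueue : (t.map (fun p => (p, s)) ++ nxt.map (fun p => (p, s + 1)))
            ++ (if s < steps then (pvNb listgrid w h q).map (fun p => (p, s + 1)) else [])
          = t.map (fun p => (p, s))
            ++ ((nxt ++ if s < steps then pvNb listgrid w h q else []).map (fun p => (p, s + 1))) := by
        by_cases hlt : s < steps <;> simp [hlt, List.append_assoc]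
      rw [hqueue]
      have := ih (nxt ++ if s < steps then pvNb listgrid w h q else []) (v.insert q s) f' (by omega)
      rw [this, hkeys]
      rw [show f' + 1 - (q :: t).length = f' - t.length by simp]
      congr 2
      by_cases hlt : s < steps <;> simp [hlt, List.append_assoc]

-- B's expansion of a frontier is exactly the dedup of the admissible neighbour stream
theorem pvExpandB_eq (listgrid : List String) (w h : Int)
    (F : List (Int × Int)) (seen : PySem.Set (Int × Int)) :
    pvExpandB listgrid w h F seen =
      (seen ++ pvFresh seen (F.flatMap (pvNb listgrid w h)),
       pvFresh seen (F.flatMap (pvNb listgrid w h))) := by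
  have h1 : ∀ (cs : List (Int × Int)) (S : PySem.Set (Int × Int)) (out : List (Int × Int)),
      cs.foldl (fun sn n =>
          if !pvIsWallB listgrid w h n.1 n.2 && !(PySem.Set.contains sn.1 n) then
            (PySem.Set.add sn.1 n, sn.2 ++ [n])
          else sn) (S, out)
        = (S ++ pvFresh S (cs.filter (fun n => !pvIsWallB listgrid w h n.1 n.2)),
           out ++ pvFresh S (cs.filter (fun n => !pvIsWallB listgrid w h n.1 n.2))) := by
    intro cs
    induction cs with
    | nil => intro S out; simp [pvFresh]
    | cons n t ih =>
      intro S out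
      by_cases hwall : pvIsWallB listgrid w h n.1 n.2
      · simpa [List.filter_cons, hwall] using ih S out
      · by_cases hm : n ∈ S
        · have hcon : PySem.Set.contains S n = true := by
            simpa [PySem.Set.contains_iff] using hm
          simp only [List.foldl_cons, List.filter_cons, Bool.not_eq_true] at *
          simpa [hwall, hcon, pvFresh, hm] using ih S out
        · have hcon : PySem.Set.contains S n = false := by
            rw [← Bool.not_eq_true, PySem.Set.contains_iff]; exact hm
          simp only [List.foldl_cons, List.filter_cons]
          rw [if_pos (by simp [hwall, hcon, hm]), PySem.Set.add_of_not_mem hm, ih]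
          simp only [Bool.not_eq_true] at hwall
          simp [pvFresh, hwall, hm, List.append_assoc]
  have h2 : pvExpandB listgrid w h F seen
      = (F.flatMap (fun p => pvDirections.map (fun d => (p.1 + d.1, p.2 + d.2)))).foldl
          (fun sn n =>
            if !pvIsWallB listgrid w h n.1 n.2 && !(PySem.Set.contains sn.1 n) then
              (PySem.Set.add sn.1 n, sn.2 ++ [n])
            else sn) (seen, []) := by
    rw [pvExpandB, List.flatMap_def, List.foldl_flatten, List.foldl_map]
    congr 1
  have h3 : (F.flatMap (fun p => pvDirections.map (fun d => (p.1 + d.1, p.2 + d.2)))).filter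
        (fun n => !pvIsWallB listgrid w h n.1 n.2) = F.flatMap (pvNb listgrid w h) := by
    rw [List.filter_flatMap]; rfl
  rw [h2, h1, h3]
  simp

theorem pvCountPar_insertSeq : ∀ (L : List (Int × Int)) (v : PySem.Dict (Int × Int) Int) (s b : Int),
    L.Nodup → (∀ p ∈ L, p ∉ v.keys) →
    pvCountPar (L.foldl (fun v p => v.insert p s) v) b
      = pvCountPar v b + (if PySem.Int.mod s 2 = b then (L.length : Int) else 0) := by
  intro L
  induction L with
  | nil => intro v s b _ _; simp
  | cons p t ih =>
    intro v s b hnd hf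
    have hp : p ∉ v.keys := hf p (by simp)
    have hcon : v.contains p = false := by
      rw [← Bool.not_eq_true, PySem.Dict.contains_iff_mem_keys]; exact hp
    have hone : pvCountPar (v.insert p s) b
        = pvCountPar v b + (if PySem.Int.mod s 2 = b then 1 else 0) := by
      rw [pvCountPar, pvCountPar, PySem.Dict.items_insert_of_not_contains _ _ hcon,
        List.filter_append, List.map_append, List.sum_append]
      have hm : PySem.Int.mod s 2 = s % 2 := PySem.Int.mod_eq_emod_of_pos (by norm_num)
      rw [hm]
      split_ifs with hh0 <;> simp [List.filter_cons, hm, hh0]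
    rw [List.foldl_cons, ih _ s b hnd.of_cons ?fresh, hone]
    case fresh =>
      intro q hq
      rw [PySem.Dict.keys_insert_of_not_contains v s hcon]
      simp only [List.mem_append, List.mem_singleton]
      rintro (hmem | rfl)
      · exact hf q (by simp [hq]) hmem
      · exact (List.nodup_cons.mp hnd).1 hq
    simp only [List.length_cons]
    split_ifs <;> push_cast <;> ring

theorem pvKeys_insertSeq (L : List (Int × Int)) (v : PySem.Dict (Int × Int) Int) (s : Int)
    (hnd : L.Nodup) (hf : ∀ p ∈ L, p ∉ v.keys) :
    (L.foldl (fun v p => v.insert p s) v).keys = v.keys ++ L := by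
  rw [PySem.Dict.keys_foldl_insert L (fun _ _ => s) v]
  exact PySem.Set.update_eq_append_of_disjoint _ _ hnd hf

theorem pvNbFlat_le (listgrid : List String) (w h : Int) :
    ∀ F : List (Int × Int), (F.flatMap (pvNb listgrid w h)).length ≤ 4 * F.length := by
  intro F
  induction F with
  | nil => simp
  | cons q t ih =>
    rw [List.flatMap_cons, List.length_append]
    have h1 : (pvNb listgrid w h q).length ≤ 4 := by
      have := List.length_filter_le (fun n => !pvIsWallB listgrid w h n.1 n.2)
        (pvDirections.map (fun d => (q.1 + d.1, q.2 + d.2)))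
      simpa [pvNb, pvDirections] using this
    simp only [List.length_cons]
    omega

theorem pvBfsA_nil (grid : PySem.Dict (Int × Int) String) (w h steps : Int) (f : Nat)
    (v : PySem.Dict (Int × Int) Int) : pvBfsA grid w h steps f [] v = v := by
  cases f <;> rfl

-- the coupled induction: A's queue BFS counted by parity equals B's level machine
theorem pvMain (listgrid : List String) {w h : Int} (steps : Int) (hw : 1 ≤ w) (hh : 1 ≤ h) :
    ∀ (rem : Nat) (s : Int) (cur : List (Int × Int)) (v : PySem.Dict (Int × Int) Int)
      (c0 c1 : Int) (f : Nat),
      (steps - s).toNat = rem →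
      (v.keys ++ pvFresh v.keys cur).Nodup →
      c0 = pvCountPar v 0 + (if PySem.Int.mod s 2 = 0 then ((pvFresh v.keys cur).length : Int) else 0) →
      c1 = pvCountPar v 1 + (if PySem.Int.mod s 2 = 1 then ((pvFresh v.keys cur).length : Int) else 0) →
      cur.length + pvNeed rem (4 * cur.length) ≤ f →
      (pvCountPar (pvBfsA (pvGridA listgrid w h) w h steps f (cur.map (fun p => (p, s))) v) 0,
       pvCountPar (pvBfsA (pvGridA listgrid w h) w h steps f (cur.map (fun p => (p, s))) v) 1)
      = pvLvlB listgrid w h rem s (pvFresh v.keys cur) (v.keys ++ pvFresh v.keys cur) c0 c1 := by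
  intro rem
  induction rem with
  | zero =>
    intro s cur v c0 c1 f hrem hnd hc0 hc1 hf
    have hsge : ¬ s < steps := by omega
    simp only [pvNeed] at hf
    have hlev := pvBfsA_level listgrid steps hw hh s cur [] v f (by omega)
    rw [if_neg hsge] at hlev
    simp only [List.map_nil, List.append_nil, List.nil_append] at hlev
    rw [hlev, pvBfsA_nil]
    have hndF : (pvFresh v.keys cur).Nodup := List.Nodup.of_append_right hnd
    have hdisj : ∀ p ∈ pvFresh v.keys cur, p ∉ v.keys := by
      intro p hp hk
      exact (List.disjoint_of_nodup_append hnd) hk hp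
    rw [pvCountPar_insertSeq _ v s 0 hndF hdisj, pvCountPar_insertSeq _ v s 1 hndF hdisj]
    rw [pvLvlB, ← hc0, ← hc1]
  | succ r ih =>
    intro s cur v c0 c1 f hrem hnd hc0 hc1 hf
    have hlt : s < steps := by omega
    have hndF : (pvFresh v.keys cur).Nodup := List.Nodup.of_append_right hnd
    have hdisj : ∀ p ∈ pvFresh v.keys cur, p ∉ v.keys := by
      intro p hp hk
      exact (List.disjoint_of_nodup_append hnd) hk hp
    have hneed : pvNeed (r + 1) (4 * cur.length) = 4 * cur.length + pvNeed r (16 * cur.length) := by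
      simp [pvNeed]; ring_nf
    have hlev := pvBfsA_level listgrid steps hw hh s cur [] v f (by omega)
    rw [if_pos hlt] at hlev
    simp only [List.map_nil, List.append_nil, List.nil_append] at hlev
    rw [hlev]
    by_cases hF0 : pvFresh v.keys cur = []
    · rw [hF0]
      simp only [List.flatMap_nil, List.map_nil, List.foldl_nil]
      rw [pvBfsA_nil, pvLvlB]
      have e0 : c0 = pvCountPar v 0 := by rw [hc0, hF0]; split_ifs <;> simp
      have e1 : c1 = pvCountPar v 1 := by rw [hc1, hF0]; split_ifs <;> simp
      rw [e0, e1]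
    · obtain ⟨q, t, hqt⟩ : ∃ q t, pvFresh v.keys cur = q :: t := by
        cases hc : pvFresh v.keys cur with
        | nil => exact absurd hc hF0
        | cons a b => exact ⟨a, b, rfl⟩
      have hkeys' : ((pvFresh v.keys cur).foldl (fun v p => v.insert p s) v).keys
          = v.keys ++ pvFresh v.keys cur := pvKeys_insertSeq _ v s hndF hdisj
      have hcnt0 := pvCountPar_insertSeq (pvFresh v.keys cur) v s 0 hndF hdisj
      have hcnt1 := pvCountPar_insertSeq (pvFresh v.keys cur) v s 1 hndF hdisj
      have hexp := pvExpandB_eq listgrid w h (pvFresh v.keys cur) (v.keys ++ pvFresh v.keys cur)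
      have hC : ((pvFresh v.keys cur).flatMap (pvNb listgrid w h)).length ≤ 4 * cur.length := by
        have h1 := pvNbFlat_le listgrid w h (pvFresh v.keys cur)
        have h2 := pvFresh_length_le v.keys cur
        omega
      have hfuel : ((pvFresh v.keys cur).flatMap (pvNb listgrid w h)).length
          + pvNeed r (4 * ((pvFresh v.keys cur).flatMap (pvNb listgrid w h)).length)
          ≤ f - cur.length := by
        have hmono := pvNeed_mono r
          (show 4 * ((pvFresh v.keys cur).flatMap (pvNb listgrid w h)).length ≤ 16 * cur.length by omega)
        omega
      have hms : PySem.Int.mod s 2 = s % 2 := PySem.Int.mod_eq_emod_of_pos (by norm_num)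
      have hms1 : PySem.Int.mod (s + 1) 2 = (s + 1) % 2 := PySem.Int.mod_eq_emod_of_pos (by norm_num)
      have hpar2 : s % 2 = 0 ∨ s % 2 = 1 := Int.emod_two_eq_zero_or_one s
      rw [hqt, pvLvlB, ← hqt, hexp]
      by_cases hpar : PySem.Int.mod (s + 1) 2 = 0
      · rw [if_pos hpar]
        have hs1 : s % 2 = 1 := by omega
        have := ih (s + 1) ((pvFresh v.keys cur).flatMap (pvNb listgrid w h))
          ((pvFresh v.keys cur).foldl (fun v p => v.insert p s) v)
          (c0 + ((pvFresh (v.keys ++ pvFresh v.keys cur)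
            ((pvFresh v.keys cur).flatMap (pvNb listgrid w h))).length : Int)) c1
          (f - cur.length) (by omega)
          (by rw [hkeys']; exact pvFresh_nodup_append _ _ hnd)
          (by rw [hkeys', hcnt0, hc0]
              simp only [hms, hms1]
              split_ifs <;> omega)
          (by rw [hkeys', hcnt1, hc1]
              simp only [hms, hms1]
              split_ifs <;> omega)
          hfuel
        rw [this, hkeys']
      · rw [if_neg hpar]
        have hs1 : s % 2 = 0 := by omega
        have := ih (s + 1) ((pvFresh v.keys cur).flatMap (pvNb listgrid w h))
          ((pvFresh v.keys cur).foldl (fun v p => v.insert p s) v)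
          c0 (c1 + ((pvFresh (v.keys ++ pvFresh v.keys cur)
            ((pvFresh v.keys cur).flatMap (pvNb listgrid w h))).length : Int))
          (f - cur.length) (by omega)
          (by rw [hkeys']; exact pvFresh_nodup_append _ _ hnd)
          (by rw [hkeys', hcnt0, hc0]
              simp only [hms, hms1]
              split_ifs <;> omega)
          (by rw [hkeys', hcnt1, hc1]
              simp only [hms, hms1]
              split_ifs <;> omega)
          hfuel
        rw [this, hkeys']

theorem pvRuns_eq (listgrid : List String) (w h : Int) (start : Int × Int) (steps : Int)
    (hcase : (1 ≤ w ∧ 1 ≤ h) ∨ steps ≤ 0) :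
    pvRunStepsA listgrid w h start steps = pvRunStepsB listgrid w h start steps := by
  have hofl : PySem.Set.ofList [start] = [start] := by
    simp [PySem.Set.ofList, PySem.Set.add]
  rcases hcase with ⟨hw, hh⟩ | hle
  · have h1 : pvFresh (PySem.Dict.empty : PySem.Dict (Int × Int) Int).keys [start] = [start] := by
      simp [pvFresh, PySem.Dict.keys_empty]
    have hmain := pvMain listgrid steps hw hh steps.toNat 0 [start] PySem.Dict.empty 1 0
      (1 + pvNeed steps.toNat 4)
      (by simp)
      (by rw [h1]; simp [PySem.Dict.keys_empty])
      (by rw [h1]; simp [pvCountPar, PySem.Int.mod_eq_emod_of_pos (show (0:Int) < 2 by norm_num)])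
      (by rw [h1]; simp [pvCountPar, PySem.Int.mod_eq_emod_of_pos (show (0:Int) < 2 by norm_num)])
      (by simp)
    rw [h1, PySem.Dict.keys_empty, List.nil_append] at hmain
    simp only [List.map_cons, List.map_nil] at hmain
    simp only [pvRunStepsA, pvRunStepsB, hofl]
    split_ifs with hpar
    · exact congrArg Prod.fst hmain
    · exact congrArg Prod.snd hmain
  · have h0 : ¬ (0:Int) < steps := by omega
    have htn : steps.toNat = 0 := by omega
    have hcon : (PySem.Dict.empty : PySem.Dict (Int × Int) Int).contains start = false :=
      PySem.Dict.contains_empty start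
    simp only [pvRunStepsA, pvRunStepsB, htn, hofl]
    rw [show (1 + pvNeed 0 4) = pvNeed 0 4 + 1 by omega]
    simp only [pvBfsA, hcon, Bool.false_eq_true, if_false, pvDirections]
    simp only [List.foldl_cons, List.foldl_nil, h0, false_and, if_false]
    rw [pvBfsA_nil, pvLvlB]
    have hitems : ((PySem.Dict.empty : PySem.Dict (Int × Int) Int).insert start 0).items
        = [(start, 0)] := by
      rw [PySem.Dict.items_insert_of_not_contains _ _ hcon]
      simp [PySem.Dict.empty]
    rw [hitems]
    split_ifs with hpar <;> simp [PySem.Int.mod_eq_emod_of_pos (show (0:Int) < 2 by norm_num)]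

-- last-but-one / last-but-two of an appended list are the last / last-but-one of the list
theorem pvGet2 (l : List Int) (v : Int) :
    PySem.List.pyGetD (l ++ [v]) (-2) 0 = PySem.List.pyGetD l (-1) 0 := by
  cases l with
  | nil => simp [PySem.List.pyGetD, PySem.List.pyGet?, PySem.List.pyIdx?]
  | cons a t =>
    rw [PySem.List.pyGetD_neg_ofNat _ 2 0 (by omega) (by simp),
        PySem.List.pyGetD_neg_ofNat _ 1 0 (by omega) (by simp)]
    simp only [List.length_append, List.length_cons, List.length_nil]
    rw [List.getElem_append_left (by simp)]
    congr 1

theorem pvGet3 (l : List Int) (v : Int) :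
    PySem.List.pyGetD (l ++ [v]) (-3) 0 = PySem.List.pyGetD l (-2) 0 := by
  match l with
  | [] => simp [PySem.List.pyGetD, PySem.List.pyGet?, PySem.List.pyIdx?]
  | [a] => simp [PySem.List.pyGetD, PySem.List.pyGet?, PySem.List.pyIdx?]
  | a :: b :: t =>
    rw [PySem.List.pyGetD_neg_ofNat _ 3 0 (by omega) (by simp),
        PySem.List.pyGetD_neg_ofNat _ 2 0 (by omega) (by simp)]
    simp only [List.length_append, List.length_cons, List.length_nil]
    rw [List.getElem_append_left (by simp)]
    congr 1

-- case equations of the sliding-window update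
theorem pvStepB_big (k prev d dd1 dd2 dd3 v : Int) (h : 2 ≤ k) :
    pvStepB k prev d dd1 dd2 dd3 v = (v - prev, v - prev - d, dd1, dd2) := by
  rw [pvStepB, if_pos (by omega : (1:Int) ≤ k), if_pos h]

theorem pvStepB_mid (k prev d dd1 dd2 dd3 v : Int) (h1 : 1 ≤ k) (h2 : ¬ 2 ≤ k) :
    pvStepB k prev d dd1 dd2 dd3 v = (v - prev, dd1, dd2, dd3) := by
  rw [pvStepB, if_pos h1, if_neg h2]

theorem pvStepB_zero (k prev d dd1 dd2 dd3 v : Int) (h : ¬ 1 ≤ k) :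
    pvStepB k prev d dd1 dd2 dd3 v = (d, dd1, dd2, dd3) := by
  rw [pvStepB, if_neg h]

theorem pvGet1s (x : Int) : PySem.List.pyGetD [x] (-1) 0 = x := by
  simp [PySem.List.pyGetD, PySem.List.pyGet?, PySem.List.pyIdx?]

-- the list-based sampling loop of A, projected to its last entries, is B's scalar loop
theorem pvSample_eq (listgrid : List String) (w h : Int) (start : Int × Int) :
    ∀ (rounds : List Int) (results diff dd : List Int) (round : Int),
      (∀ r ∈ rounds, pvRunStepsA listgrid w h start r = pvRunStepsB listgrid w h start r) →
      diff.length = results.length - 1 →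
      dd.length = results.length - 2 →
      (PySem.List.pyGetD (pvLoopA listgrid w h start rounds results diff dd round).1 (-1) 0,
       PySem.List.pyGetD (pvLoopA listgrid w h start rounds results diff dd round).2.1 (-1) 0,
       PySem.List.pyGetD (pvLoopA listgrid w h start rounds results diff dd round).2.2.1 (-1) 0,
       (pvLoopA listgrid w h start rounds results diff dd round).2.2.2)
      = pvSampleB listgrid w h start rounds (results.length : Int)
          (PySem.List.pyGetD results (-1) 0) (PySem.List.pyGetD diff (-1) 0)
          (PySem.List.pyGetD dd (-1) 0) (PySem.List.pyGetD dd (-2) 0) (PySem.List.pyGetD dd (-3) 0) round := by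
  intro rounds
  induction rounds with
  | nil => intro results diff dd round _ _ _; rfl
  | cons r rest ih =>
    intro results diff dd round hruns hdlen hddlen
    have hrun : pvRunStepsA listgrid w h start r = pvRunStepsB listgrid w h start r :=
      hruns r List.mem_cons_self
    have hruns' : ∀ r' ∈ rest, pvRunStepsA listgrid w h start r' = pvRunStepsB listgrid w h start r' :=
      fun r' hr' => hruns r' (List.mem_cons_of_mem r hr')
    simp only [pvLoopA, pvSampleB, hrun]
    simp only [List.length_append, List.length_cons, List.length_nil, Nat.zero_add]
    set v := pvRunStepsB listgrid w h start r with hv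
    by_cases hk1 : 1 ≤ results.length
    · by_cases hk2 : 2 ≤ results.length
      · -- k ≥ 2: both diff and dd get an append
        rw [if_pos (show 2 ≤ results.length + 1 by omega)]
        simp only [List.length_append, List.length_cons, List.length_nil, Nat.zero_add]
        rw [if_pos (show 2 ≤ diff.length + 1 by omega)]
        simp only [List.length_append, List.length_cons, List.length_nil, Nat.zero_add,
          PySem.List.pyGetD_neg_one_append_singleton, pvGet2, pvGet3]
        rw [pvStepB_big _ _ _ _ _ _ _ (show (2:Int) ≤ (results.length : Int) by exact_mod_cast hk2)]
        dsimp only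
        simp only [show (3 ≤ dd.length + 1) = (5 ≤ (results.length : Int) + 1) from
          propext (by constructor <;> intro <;> omega)]
        split_ifs with hbrk
        · dsimp only
          simp only [PySem.List.pyGetD_neg_one_append_singleton, pvGet2, pvGet3]
        · have H := ih (results ++ [v]) (diff ++ [v - PySem.List.pyGetD results (-1) 0])
            (dd ++ [v - PySem.List.pyGetD results (-1) 0 - PySem.List.pyGetD diff (-1) 0]) r
            hruns' (by simp; omega) (by simp; omega)
          rw [H]
          simp only [List.length_append, List.length_cons, List.length_nil, Nat.zero_add,
            PySem.List.pyGetD_neg_one_append_singleton, pvGet2, pvGet3, Nat.cast_add,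
            Nat.cast_one]
      · -- k = 1: diff gets its first entry, dd stays empty
        have hd0 : diff = [] := List.eq_nil_of_length_eq_zero (by omega)
        have hdd0 : dd = [] := List.eq_nil_of_length_eq_zero (by omega)
        subst hd0 hdd0
        rw [if_pos (show 2 ≤ results.length + 1 by omega)]
        simp only [List.length_append, List.length_cons, List.length_nil, List.nil_append,
          Nat.zero_add, PySem.List.pyGetD_neg_one_append_singleton, pvGet2, pvGet3]
        rw [if_neg (show ¬ 2 ≤ 1 by omega)]
        rw [pvStepB_mid _ _ _ _ _ _ _
          (show (1:Int) ≤ (results.length : Int) by exact_mod_cast hk1)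
          (show ¬ (2:Int) ≤ (results.length : Int) by exact_mod_cast hk2)]
        dsimp only
        simp only [List.length_nil]
        simp only [show (3 ≤ (0:Nat)) = (5 ≤ (results.length : Int) + 1) from
          propext (by constructor <;> intro <;> omega)]
        split_ifs with hbrk
        · exact absurd hbrk.1 (by omega)
        · have H := ih (results ++ [v]) [v - PySem.List.pyGetD results (-1) 0] [] r
            hruns' (by simp; omega) (by simp; omega)
          rw [H]
          simp only [List.length_append, List.length_cons, List.length_nil, Nat.zero_add,
            PySem.List.pyGetD_neg_one_append_singleton, pvGet1s, pvGet2, pvGet3, Nat.cast_add,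
            Nat.cast_one]
    · -- k = 0: only results grows
      have hr0 : results = [] := List.eq_nil_of_length_eq_zero (by omega)
      subst hr0
      have hL : ([] : List Int).length = 0 := rfl
      have hd0 : diff = [] := List.eq_nil_of_length_eq_zero (by omega)
      have hdd0 : dd = [] := List.eq_nil_of_length_eq_zero (by omega)
      subst hd0 hdd0
      simp only [List.length_nil, List.nil_append, List.length_cons, Nat.zero_add]
      rw [if_neg (show ¬ 2 ≤ 1 by omega)]
      simp only [List.length_nil]
      rw [if_neg (show ¬ 2 ≤ (0:Nat) by omega)]
      simp only [List.length_nil]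
      rw [pvStepB_zero _ _ _ _ _ _ _ (show ¬ (1:Int) ≤ ((0:Nat) : Int) by norm_num)]
      dsimp only
      simp only [show (3 ≤ (0:Nat)) = (5 ≤ (((0:Nat) : Int)) + 1) from by norm_num]
      split_ifs with hbrk
      · exact absurd hbrk.1 (by norm_num)
      · have H := ih [v] [] [] r hruns' (by simp) (by simp)
        rw [H]
        simp [pvGet1s]

-- the extrapolation loop in closed form
theorem pvFoldLin (ddl : Int) : ∀ (l : List Int) (res dist : Int),
    (l.foldl (fun rd _ => (rd.1 + rd.2 + ddl, rd.2 + ddl)) (res, dist))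
      = (res + l.length * dist + ddl * ((l.length * (l.length + 1) / 2 : Nat) : Int),
         dist + l.length * ddl) := by
  intro l
  induction l with
  | nil => simp
  | cons x t ih =>
    intro res dist
    rw [List.foldl_cons, ih]
    have harith : (t.length + 1) * (t.length + 1 + 1) / 2 = t.length * (t.length + 1) / 2 + (t.length + 1) := by
      have h2 : (t.length + 1) * (t.length + 1 + 1) = t.length * (t.length + 1) + (t.length + 1) * 2 := by ring
      rw [h2, Nat.add_mul_div_right _ _ (by omega)]
    simp only [List.length_cons, harith]
    refine Prod.ext ?_ ?_ <;> simp <;> push_cast <;> ring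

theorem pvExtrapolate (n res dist ddl : Int) :
    ((PySem.List.pyRange 0 n 1).foldl (fun rd _ => (rd.1 + rd.2 + ddl, rd.2 + ddl)) (res, dist)).1
      = res + max 0 n * dist + ddl * PySem.Int.floordiv (max 0 n * (max 0 n + 1)) 2 := by
  rw [pvFoldLin]
  have hlen : (PySem.List.pyRange 0 n 1).length = n.toNat := by
    rw [PySem.List.length_pyRange_one]; omega
  have hmax : max 0 n = ((n.toNat : Nat) : Int) := by omega
  rw [hlen, hmax]
  have hc : ((n.toNat : Nat) : Int) * (((n.toNat : Nat) : Int) + 1) = ((n.toNat * (n.toNat + 1) : Nat) : Int) := by push_cast; ring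
  rw [hc, show ((2:Int)) = ((2:Nat):Int) from rfl, PySem.Int.floordiv_natCast]

theorem pvRange_neg_step_le (a b step x : Int) (h : step < 0) (hm : x ∈ PySem.List.pyRange a b step) :
    x ≤ a := by
  simp only [PySem.List.pyRange, if_neg (by omega : ¬ step = 0), List.mem_map, List.mem_range] at hm
  obtain ⟨k, _, rfl⟩ := hm
  have : step * (k : Int) ≤ 0 := mul_nonpos_of_nonpos_of_nonneg (by omega) (by positivity)
  omega

-- ===== VERDICT (by name: the statement is the Claim_ definition above) =====
theorem part2_spec : Claim_equal_part2 := by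
  intro listgrid width height start target _ hpre
  show part2 listgrid width height start target = part2_alt listgrid width height start target
  have hruns : ∀ r ∈ PySem.List.pyRange (PySem.Int.mod target width)
      (PySem.Int.mod target width + 8 * width) width,
      pvRunStepsA listgrid width height start r = pvRunStepsB listgrid width height start r := by
    intro r hr
    rcases hpre with hneg | ⟨hw, hh, _, _⟩
    · refine pvRuns_eq listgrid width height start r (Or.inr ?_)
      have h1 := pvRange_neg_step_le _ _ _ _ hneg hr
      have h2 := (PySem.Int.mod_neg_bounds target hneg).2
      omega
    · exact pvRuns_eq listgrid width height start r (Or.inl ⟨hw, hh⟩)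
  have hs := pvSample_eq listgrid width height start
    (PySem.List.pyRange (PySem.Int.mod target width)
      (PySem.Int.mod target width + 8 * width) width)
    [] [] [] (PySem.Int.mod target width) hruns (by simp) (by simp)
  have hnil : ∀ i : Int, PySem.List.pyGetD ([] : List Int) i 0 = 0 := by
    intro i
    simp [PySem.List.pyGetD, PySem.List.pyGet?, PySem.List.pyIdx?]
  simp only [hnil, List.length_nil, Nat.cast_zero] at hs
  have h1 := congrArg (fun t : Int × Int × Int × Int => t.1) hs
  have h2 := congrArg (fun t : Int × Int × Int × Int => t.2.1) hs
  have h3 := congrArg (fun t : Int × Int × Int × Int => t.2.2.1) hs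
  have h4 := congrArg (fun t : Int × Int × Int × Int => t.2.2.2) hs
  dsimp only at h1 h2 h3 h4
  simp only [part2, part2_alt]
  rw [pvExtrapolate, h1, h2, h3, h4]
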